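-- pv_equiv track=rewrite | github.com/IulianGiusca95/Aspect-Based-Sentiment-Analysis | make_lexicon_file.py | getTokens_bigram
-- ===== SOURCE A (Python) =====
-- import string
--
-- translator = str.maketrans('', '', string.punctuation)
--
-- def getTokens_bigram(sentences):
-- 	tokens = []
-- 	occurences = []
-- 	for sentence in sentences:
-- 		s = sentence.lower().translate(translator)
-- 		words = s.split(" ")
-- 		len(words)
--
-- 		for i in range(len(words)-1):
-- 			if words[i]+','+words[i+1] in tokens:
-- 				index = tokens.index(words[i]+','+words[i+1])
-- 				occurences[index] = occurences[index]+1
-- 			else: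
-- 				tokens.append(words[i]+','+words[i+1])
-- 				occurences.append(1)
--
--
-- 	return tokens, occurences
-- ===== SOURCE B (Python) =====
-- import string
--
-- translator = str.maketrans('', '', string.punctuation)
--
-- def getTokens_bigram(sentences):
--     # Pass 1: extract every bigram via pairwise zip (no index arithmetic, no branch).
--     all_bigrams = []
--     for sentence in sentences:
--         words = sentence.lower().translate(translator).split(" ")
--         all_bigrams.extend(a + ',' + b for a, b in zip(words, words[1:]))
--     # Pass 2: ordered dedup gives the tokens in first-seen order.
--     tokens = list(dict.fromkeys(all_bigrams))
--     # Pass 3: occurrences are plain counts over the flat bigram list.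
--     occurences = [all_bigrams.count(t) for t in tokens]
--     return tokens, occurences
-- ===== Notes on version B (the rewrite author's own statement) =====
-- stated objective: alternative
-- what changed: A's single incremental pass with a membership test and list.index bump is replaced by three stateless stages: pairwise-zip extraction of all bigrams, an ordered dedup (dict.fromkeys) for the token list, then a count() scan per distinct token for the occurrences; no counter state is threaded through the loops at all.
import Mathlib
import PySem

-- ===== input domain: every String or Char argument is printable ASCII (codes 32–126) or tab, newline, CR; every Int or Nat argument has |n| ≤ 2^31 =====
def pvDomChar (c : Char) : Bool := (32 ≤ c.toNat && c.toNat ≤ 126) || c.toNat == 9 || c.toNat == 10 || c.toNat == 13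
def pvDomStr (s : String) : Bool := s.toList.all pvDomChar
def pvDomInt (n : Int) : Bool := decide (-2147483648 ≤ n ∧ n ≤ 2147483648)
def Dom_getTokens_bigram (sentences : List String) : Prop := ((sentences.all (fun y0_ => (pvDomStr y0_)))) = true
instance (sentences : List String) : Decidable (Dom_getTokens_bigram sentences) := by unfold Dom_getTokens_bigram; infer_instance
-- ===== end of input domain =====

-- B replaces A's stateful membership/list.index pass by three stateless stages:
-- pairwise-zip extraction, ordered dedup for the token list, then a count() per token.


-- ===== PORT A =====
-- string.punctuation
def pvPunct : List Char := "!\"#$%&'()*+,-./:;<=>?@[\\]^_`{|}~".toList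

-- sentence.lower().translate(translator): translate with a deletion-only table removes exactly the
-- punctuation characters; ported by hand as a filter over the char list (exact on the ASCII domain).
def pvClean (s : String) : String :=
  String.ofList (((PySem.Str.lower s).toList).filter (fun c => !(pvPunct.contains c)))

-- s.split(" "): the separator is nonempty, so PySem.Str.split? is always `some`; getD [] unwraps it.
def pvWords (s : String) : List String :=
  (PySem.Str.split? (pvClean s) " ").getD []

/-- A's per-bigram update: membership test, list.index, bump-or-append (the if/else body of A's inner loop). -/
def pvStepA (st : List String × List Int) (key : String) : List String × List Int :=
  let (tokens, occ) := st
  if tokens.contains key then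
    let index := (PySem.List.index? tokens key).getD 0
    (tokens, occ.set index (PySem.List.pyGetD occ (index : Int) 0 + 1))
  else
    (tokens ++ [key], occ ++ [(1 : Int)])

def getTokens_bigram (sentences : List String) : List String × List Int :=
  sentences.foldl
    (fun st sentence =>
      let words := pvWords sentence
      (PySem.List.pyRange 0 ((words.length : Int) - 1) 1).foldl
        (fun st i =>
          pvStepA st (PySem.List.pyGetD words i "" ++ "," ++ PySem.List.pyGetD words (i + 1) ""))
        st)
    ([], [])

-- ===== PORT B =====
def getTokens_bigram_alt (sentences : List String) : List String × List Int :=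
  let allBigrams :=
    sentences.foldl
      (fun acc sentence =>
        let words := pvWords sentence
        -- zip(words, words[1:]): words[1:] is List.drop 1 (exact for a nonnegative start)
        acc ++ (words.zip (words.drop 1)).map (fun p => p.1 ++ "," ++ p.2))
      []
  let tokens := PySem.List.dedup allBigrams
  (tokens, tokens.map (fun t => (PySem.List.count allBigrams t : Int)))

-- ===== PRECONDITION & SPEC =====
def Spec_getTokens_bigram (sentences : List String) (out : List String × List Int) : Prop := out = getTokens_bigram_alt sentences
instance (sentences : List String) (out : List String × List Int) : Decidable (Spec_getTokens_bigram sentences out) := by unfold Spec_getTokens_bigram; infer_instance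

-- ===== CLAIM (what is proved, stated in full; the proofs are below) =====
def Claim_equal_getTokens_bigram : Prop := ∀ (sentences : List String), Dom_getTokens_bigram sentences → Spec_getTokens_bigram sentences (getTokens_bigram sentences)

-- ===== LEMMAS AND PROOFS =====

/-- The bigram list of one sentence's word list, in A's index form. -/
def pvBigrams (words : List String) : List String :=
  (PySem.List.pyRange 0 ((words.length : Int) - 1) 1).map
    (fun i => PySem.List.pyGetD words i "" ++ "," ++ PySem.List.pyGetD words (i + 1) "")

/-- A's index form of the bigram list equals B's zip form. -/
lemma pvBigrams_eq_zip (words : List String) :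
    pvBigrams words = (words.zip (words.drop 1)).map (fun p => p.1 ++ "," ++ p.2) := by
  apply List.ext_getElem
  · simp [pvBigrams, PySem.List.length_pyRange_one]
  · intro k h1 h2
    have hk : k < words.length - 1 := by
      simpa [pvBigrams, PySem.List.length_pyRange_one] using h1
    have hkw : k < words.length := by omega
    have hk1 : k + 1 < words.length := by omega
    simp only [pvBigrams, List.getElem_map, PySem.List.getElem_pyRange_one, List.getElem_zip,
      List.getElem_drop]
    have e1 : (0 : Int) + k = ((k : Nat) : Int) := by omega
    rw [e1, PySem.List.pyGetD_natCast,
      show ((k : Nat) : Int) + 1 = (((k + 1 : Nat)) : Int) by push_cast; ring,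
      PySem.List.pyGetD_natCast,
      List.getD_eq_getElem _ _ hkw, List.getD_eq_getElem _ _ hk1]
    simp [Nat.add_comm]

/-- A's state after processing the bigram prefix `p`. -/
def pvState (p : List String) : List String × List Int :=
  (PySem.Set.ofList p, (PySem.Set.ofList p).map (fun t => (p.count t : Int)))

lemma pvStepA_state (p : List String) (b : String) :
    pvStepA (pvState p) b = pvState (p ++ [b]) := by
  by_cases hb : b ∈ p
  · -- repeated bigram: the count at b's first-seen index is bumped
    have hbs : b ∈ PySem.Set.ofList p := (PySem.Set.mem_ofList p b).2 hb
    have hnd : (PySem.Set.ofList p).Nodup := PySem.Set.nodup_ofList p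
    set l := PySem.Set.ofList p with hl
    have hi : List.idxOf b l < l.length := List.idxOf_lt_length_of_mem hbs
    have hget : l[List.idxOf b l]'hi = b := List.getElem_idxOf hi
    have hidx : PySem.List.index? l b = some (List.idxOf b l) := by
      rw [PySem.List.index?_eq_idxOf?, List.idxOf?_eq_some_iff]
      refine ⟨hi, hget, ?_⟩
      intro j hj he
      have hjl : j < l.length := lt_trans hj hi
      have := hnd.idxOf_getElem j hjl
      rw [show l[j] = b from he] at this
      omega
    have hofl : PySem.Set.ofList (p ++ [b]) = l := by
      rw [PySem.Set.ofList_append_singleton, PySem.Set.add_of_mem hbs]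
    have hocc : (l.map (fun t => (p.count t : Int))).set (List.idxOf b l)
        (((p.count b : Int)) + 1) = l.map (fun t => ((p ++ [b]).count t : Int)) := by
      apply List.ext_getElem
      · simp
      · intro j hj1 hj2
        have hjl : j < l.length := by simpa using hj2
        rw [List.getElem_set]
        by_cases hji : List.idxOf b l = j
        · subst hji
          rw [if_pos rfl, List.getElem_map, hget]
          simp [List.count_append]
        · rw [if_neg hji, List.getElem_map, List.getElem_map]
          have hne : l[j]'hjl ≠ b := by
            intro h
            exact hji ((hnd.getElem_inj_iff).1 (hget.trans h.symm))
          simp [List.count_append, Ne.symm hne]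
    have hgetD : PySem.List.pyGetD (l.map (fun t => (p.count t : Int)))
        ((List.idxOf b l : Nat) : Int) 0 = (p.count b : Int) := by
      rw [PySem.List.pyGetD_natCast,
        List.getD_eq_getElem _ _ (by simpa using hi), List.getElem_map, hget]
    simp only [pvStepA, pvState, ← hl, hofl]
    rw [if_pos (by simp [hbs]), hidx]
    simp only [Option.getD_some, hgetD, hocc]
  · -- new bigram: appended with count 1
    have hbs : b ∉ PySem.Set.ofList p := fun h => hb ((PySem.Set.mem_ofList p b).1 h)
    have hofl : PySem.Set.ofList (p ++ [b]) = PySem.Set.ofList p ++ [b] := by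
      rw [PySem.Set.ofList_append_singleton, PySem.Set.add_of_not_mem hbs]
    have hmap : (PySem.Set.ofList p).map (fun t => (p.count t : Int)) =
        (PySem.Set.ofList p).map (fun t => ((p ++ [b]).count t : Int)) := by
      apply List.map_congr_left
      intro t ht
      have htp : t ∈ p := (PySem.Set.mem_ofList p t).1 ht
      have hne : t ≠ b := fun h => hb (h ▸ htp)
      simp [List.count_append, Ne.symm hne]
    simp only [pvStepA, pvState, hofl]
    rw [if_neg (by simp [hbs]), List.map_append, ← hmap]
    simp [List.count_append, List.count_eq_zero_of_not_mem hb]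

lemma pvFoldA_state (L p : List String) :
    L.foldl pvStepA (pvState p) = pvState (p ++ L) := by
  induction L generalizing p with
  | nil => simp
  | cons b L ih =>
    simp only [List.foldl_cons, pvStepA_state]
    rw [ih (p ++ [b]), List.append_assoc]
    rfl

set_option maxHeartbeats 1600000 in
/-- A is the per-bigram fold over the flat bigram list. -/
lemma getTokens_bigram_eq_fold (sentences : List String) :
    getTokens_bigram sentences =
      ((sentences.map (fun s => pvBigrams (pvWords s))).flatten).foldl pvStepA ([], []) := by
  have ha : getTokens_bigram sentences = sentences.foldl
      (fun st sentence =>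
        (PySem.List.pyRange 0 (((pvWords sentence).length : Int) - 1) 1).foldl
          (fun st i =>
            pvStepA st (PySem.List.pyGetD (pvWords sentence) i "" ++ "," ++
              PySem.List.pyGetD (pvWords sentence) (i + 1) ""))
          st)
      ([], []) := rfl
  have hfun : (fun (st : List String × List Int) sentence =>
        (PySem.List.pyRange 0 (((pvWords sentence).length : Int) - 1) 1).foldl
          (fun st i =>
            pvStepA st (PySem.List.pyGetD (pvWords sentence) i "" ++ "," ++
              PySem.List.pyGetD (pvWords sentence) (i + 1) ""))
          st) =
      (fun st s => (pvBigrams (pvWords s)).foldl pvStepA st) := by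
    funext st s
    rw [pvBigrams, List.foldl_map]
  rw [ha, hfun, List.foldl_flatten, List.foldl_map]

set_option maxHeartbeats 1600000 in
/-- B's flat bigram accumulation is the same flattened map (via the zip↔index bridge). -/
lemma getTokens_bigram_alt_bigrams (sentences : List String) :
    (sentences.foldl
      (fun acc sentence =>
        acc ++ ((pvWords sentence).zip ((pvWords sentence).drop 1)).map
          (fun p => p.1 ++ "," ++ p.2))
      []) =
    (sentences.map (fun s => pvBigrams (pvWords s))).flatten := by
  have hfun : (fun (acc : List String) sentence =>
        acc ++ ((pvWords sentence).zip ((pvWords sentence).drop 1)).map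
          (fun p => p.1 ++ "," ++ p.2)) =
      (fun acc s => acc ++ pvBigrams (pvWords s)) := by
    funext acc s
    rw [pvBigrams_eq_zip]
  rw [hfun, PySem.List.foldl_append_eq_flatMap, List.nil_append, List.flatMap_def]

-- ===== VERDICT (by name: the statement is the Claim_ definition above) =====
set_option maxHeartbeats 1600000 in
theorem getTokens_bigram_spec : Claim_equal_getTokens_bigram := by
  intro sentences _
  unfold Spec_getTokens_bigram getTokens_bigram_alt
  rw [getTokens_bigram_alt_bigrams, getTokens_bigram_eq_fold]
  generalize (sentences.map (fun s => pvBigrams (pvWords s))).flatten = bgs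
  have h := pvFoldA_state bgs []
  simp only [List.nil_append] at h
  have hstate : pvState ([] : List String) = (([], []) : List String × List Int) := by
    simp [pvState]
  rw [← hstate, h, pvState]
  simp [PySem.List.dedup_eq_ofList, PySem.List.count_eq]
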